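-- pv_equiv track=rewrite | github.com/DoubleDi/python_projects | parallel_string_order/order.py | check_text_ordering
-- ===== SOURCE A (Python) =====
-- from typing import List, Tuple
--
-- def check_text_ordering(text: str, ordering_string: str) -> Tuple[bool, str]:
--     letters = set(ordering_string)
--     after = {}
--     for i, l in enumerate(ordering_string):
--         after[l] = set(ordering_string[i + 1 :])
--     visited = set()
--     result_string = ''
--
--     for l in text:
--         if not l in letters:
--             continue
--         if len(after.get(l, set()) & visited):
--             return False, result_string
--         if not l in visited:
--             visited.add(l)
--             result_string += l
--
--     return True, result_string
-- ===== SOURCE B (Python) =====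
-- def check_text_ordering(text: str, ordering_string: str):
--     # rank[l] = index of the LAST occurrence of l in ordering_string
--     rank = {}
--     for i, l in enumerate(ordering_string):
--         rank[l] = i
--     max_rank = -1          # highest rank among letters seen so far
--     prefix = []
--     for l in text:
--         r = rank.get(l)
--         if r is None:
--             continue
--         if r < max_rank:
--             return False, ''.join(prefix)
--         if r > max_rank:
--             max_rank = r
--             prefix.append(l)
--     return True, ''.join(prefix)
-- ===== Notes on version B (the rewrite author's own statement) =====
-- stated objective: faster
-- what changed: Instead of building a set of successor letters for every letter of the ordering (k quadratic slices) and intersecting it with the visited set at each text character, B stores only each letter's last-occurrence index and carries one running maximum index, failing when a letter's index is below the maximum seen and appending exactly when it exceeds it.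
import Mathlib
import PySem

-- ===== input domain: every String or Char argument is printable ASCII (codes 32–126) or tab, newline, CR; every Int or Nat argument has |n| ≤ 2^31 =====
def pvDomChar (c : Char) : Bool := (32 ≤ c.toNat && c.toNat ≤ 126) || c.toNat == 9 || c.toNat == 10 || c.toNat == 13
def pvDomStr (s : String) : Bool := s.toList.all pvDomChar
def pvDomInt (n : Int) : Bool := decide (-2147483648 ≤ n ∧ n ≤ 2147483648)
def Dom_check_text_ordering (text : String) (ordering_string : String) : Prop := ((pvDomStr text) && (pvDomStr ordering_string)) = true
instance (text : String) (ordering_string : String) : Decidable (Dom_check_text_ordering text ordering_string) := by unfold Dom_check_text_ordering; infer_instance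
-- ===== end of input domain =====

-- B replaces A's per-letter "set of letters after me" (built with k quadratic slices and intersected
-- with the visited set at every text character) by a single last-index rank per letter and one running
-- maximum rank; objective: faster (O(n+k) instead of O(n*k + k^2)).

-- ===== PORT A =====
-- after[l] = set(ordering_string[i+1:]) for each (i, l) in enumerate(ordering_string), last write wins
def check_text_ordering_after (ol : List Char) : PySem.Dict Char (PySem.Set Char) :=
  (PySem.List.enumerate ol).foldl
    (fun d p => d.insert p.2 (PySem.Set.ofList (PySem.List.slice ol (some (p.1 + 1)) none)))
    PySem.Dict.empty

-- the 'for l in text' loop of A, with its early return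
def check_text_ordering_loopA (letters : PySem.Set Char) (after : PySem.Dict Char (PySem.Set Char)) :
    List Char → PySem.Set Char → List Char → Bool × String
  | [], _, res => (true, String.ofList res)
  | l :: rest, visited, res =>
    if PySem.Set.contains letters l = false then
      check_text_ordering_loopA letters after rest visited res
    else if PySem.Set.len (PySem.Set.inter (after.getD l PySem.Set.empty) visited) ≠ 0 then
      (false, String.ofList res)
    else if PySem.Set.contains visited l = false then
      check_text_ordering_loopA letters after rest (PySem.Set.add visited l) (res ++ [l])
    else
      check_text_ordering_loopA letters after rest visited res

def check_text_ordering (text : String) (ordering_string : String) : Bool × String :=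
  let ol := ordering_string.toList
  check_text_ordering_loopA (PySem.Set.ofList ol) (check_text_ordering_after ol)
    text.toList PySem.Set.empty []

-- ===== PORT B =====
-- rank[l] = i for each (i, l) in enumerate(ordering_string): the last occurrence index wins
def check_text_ordering_rank (ol : List Char) : PySem.Dict Char Int :=
  (PySem.List.enumerate ol).foldl (fun d p => d.insert p.2 p.1) PySem.Dict.empty

-- the 'for l in text' loop of B: only the running maximum rank and the prefix are carried
def check_text_ordering_loopB (rank : PySem.Dict Char Int) :
    List Char → Int → List Char → Bool × String
  | [], _, pre => (true, String.ofList pre)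
  | l :: rest, maxR, pre =>
    match rank.get? l with
    | none => check_text_ordering_loopB rank rest maxR pre
    | some r =>
      if r < maxR then (false, String.ofList pre)
      else if maxR < r then check_text_ordering_loopB rank rest r (pre ++ [l])
      else check_text_ordering_loopB rank rest maxR pre

def check_text_ordering_alt (text : String) (ordering_string : String) : Bool × String :=
  check_text_ordering_loopB (check_text_ordering_rank ordering_string.toList) text.toList (-1) []

-- ===== PRECONDITION & SPEC =====
def Spec_check_text_ordering (text : String) (ordering_string : String) (out : Bool × String) : Prop := out = check_text_ordering_alt text ordering_string
instance (text : String) (ordering_string : String) (out : Bool × String) : Decidable (Spec_check_text_ordering text ordering_string out) := by unfold Spec_check_text_ordering; infer_instance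

-- ===== CLAIM (what is proved, stated in full; the proofs are below) =====
def Claim_equal_check_text_ordering : Prop := ∀ (text : String) (ordering_string : String), Dom_check_text_ordering text ordering_string → Spec_check_text_ordering text ordering_string (check_text_ordering text ordering_string)

-- ===== LEMMAS AND PROOFS =====

-- index of the LAST occurrence of c in ol (proof-side helper)
def lastIdx : List Char → Char → Option Nat
  | [], _ => none
  | x :: xs, c =>
    match lastIdx xs c with
    | some j => some (j + 1)
    | none => if x = c then some 0 else none

theorem lastIdx_eq_none_iff (ol : List Char) (c : Char) : lastIdx ol c = none ↔ c ∉ ol := by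
  induction ol with
  | nil => simp [lastIdx]
  | cons x xs ih =>
    simp only [lastIdx, List.mem_cons]
    cases h : lastIdx xs c with
    | some j =>
      have hcx : c ∈ xs := by
        by_contra hn
        have hcontra := (ih.mpr hn).symm.trans h
        simp at hcontra
      simp [hcx]
    | none =>
      have hcx : c ∉ xs := ih.mp h
      by_cases hx : x = c
      · simp [hx]
      · have hcx' : ¬ c = x := fun he => hx he.symm
        simp [hx, hcx, hcx']

theorem lastIdx_append_singleton (xs : List Char) (x c : Char) :
    lastIdx (xs ++ [x]) c = if c = x then some xs.length else lastIdx xs c := by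
  induction xs with
  | nil =>
    by_cases h : c = x
    · simp [lastIdx, h]
    · have h' : ¬ x = c := fun he => h he.symm
      simp [lastIdx, h, h']
  | cons y ys ih =>
    simp only [List.cons_append, lastIdx, ih]
    by_cases h : c = x
    · simp [h]
    · simp [h]

theorem lastIdx_getElem {ol : List Char} {c : Char} {i : Nat} (h : lastIdx ol c = some i) :
    ∃ hi : i < ol.length, ol[i] = c := by
  induction ol generalizing i with
  | nil => simp [lastIdx] at h
  | cons x xs ih =>
    simp only [lastIdx] at h
    cases hx : lastIdx xs c with
    | some j =>
      rw [hx] at h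
      simp at h
      obtain ⟨hj, hc⟩ := ih hx
      subst h
      exact ⟨by simpa using Nat.succ_lt_succ hj, by simpa using hc⟩
    | none =>
      rw [hx] at h
      by_cases he : x = c
      · simp [he] at h; subst h; exact ⟨by simp, by simpa using he⟩
      · simp [he] at h

theorem lastIdx_last {ol : List Char} {c : Char} {i j : Nat} (hlast : lastIdx ol c = some i)
    (hj : j < ol.length) (hc : ol[j] = c) : j ≤ i := by
  induction ol generalizing i j with
  | nil => simp at hj
  | cons x xs ih =>
    simp only [lastIdx] at hlast
    cases j with
    | zero => exact Nat.zero_le _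
    | succ j' =>
      have hj' : j' < xs.length := by simpa using hj
      have hc' : xs[j'] = c := by simpa using hc
      have hmem : c ∈ xs := hc' ▸ List.getElem_mem hj'
      cases hx : lastIdx xs c with
      | none => exact absurd ((lastIdx_eq_none_iff xs c).mp hx) (by simpa using hmem)
      | some j'' =>
        rw [hx] at hlast
        simp at hlast
        subst hlast
        exact Nat.succ_le_succ (ih hx hj' hc')

theorem lastIdx_some_of_mem {ol : List Char} {c : Char} (h : c ∈ ol) :
    ∃ i, lastIdx ol c = some i := by
  cases hx : lastIdx ol c with
  | none => exact absurd ((lastIdx_eq_none_iff ol c).mp hx) (by simpa using h)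
  | some i => exact ⟨i, rfl⟩

theorem lastIdx_inj {ol : List Char} {v w : Char} {i : Nat}
    (hv : lastIdx ol v = some i) (hw : lastIdx ol w = some i) : v = w := by
  obtain ⟨hi, hgv⟩ := lastIdx_getElem hv
  obtain ⟨_, hgw⟩ := lastIdx_getElem hw
  rw [← hgv, ← hgw]

-- what membership in ol.drop (i+1) means when i is l's last index
theorem mem_drop_lastIdx {ol : List Char} {l : Char} {i : Nat} (_h : lastIdx ol l = some i)
    (v : Char) : v ∈ ol.drop (i + 1) ↔ ∃ j, lastIdx ol v = some j ∧ i < j := by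
  constructor
  · intro hv
    rw [List.mem_iff_getElem] at hv
    obtain ⟨k, hk, hvk⟩ := hv
    rw [List.getElem_drop] at hvk
    have hlen : i + 1 + k < ol.length := by
      have := hk; rw [List.length_drop] at this; omega
    have hmem : v ∈ ol := hvk ▸ List.getElem_mem hlen
    obtain ⟨j, hj⟩ := lastIdx_some_of_mem hmem
    exact ⟨j, hj, by have := lastIdx_last hj hlen hvk; omega⟩
  · rintro ⟨j, hj, hij⟩
    obtain ⟨hjl, hgv⟩ := lastIdx_getElem hj
    rw [List.mem_iff_getElem]
    refine ⟨j - (i + 1), by rw [List.length_drop]; omega, ?_⟩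
    rw [List.getElem_drop]
    have : i + 1 + (j - (i + 1)) = j := by omega
    simp only [this]
    exact hgv

-- characterization of a dict built by inserting f i at key l over enumerate ol
theorem foldl_insert_enum_get? {ν : Type} (ol : List Char) (f : Int → ν) (c : Char) :
    ((PySem.List.enumerate ol).foldl (fun d p => d.insert p.2 (f p.1)) PySem.Dict.empty).get? c
      = (lastIdx ol c).map (fun i => f (i : Int)) := by
  induction ol using List.reverseRecOn with
  | nil => simp [PySem.List.enumerate, lastIdx, PySem.Dict.get?_empty]
  | append_singleton xs x ih =>
    rw [PySem.List.enumerate_append, List.foldl_append]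
    have hx : PySem.List.enumerate [x] (0 + (xs.length : Int)) = [((xs.length : Int), x)] := by
      simp [PySem.List.enumerate]
    rw [hx]
    simp only [List.foldl_cons, List.foldl_nil]
    rw [PySem.Dict.get?_insert, lastIdx_append_singleton]
    by_cases h : c = x <;> simp [h, ih]

theorem rank_get? (ol : List Char) (c : Char) :
    (check_text_ordering_rank ol).get? c = (lastIdx ol c).map (fun i => (i : Int)) :=
  foldl_insert_enum_get? ol (fun i => i) c

theorem after_getD (ol : List Char) (c : Char) :
    (check_text_ordering_after ol).getD c PySem.Set.empty
      = match lastIdx ol c with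
        | some i => PySem.Set.ofList (ol.drop (i + 1))
        | none => PySem.Set.empty := by
  rw [PySem.Dict.getD_eq_get?_getD, check_text_ordering_after,
    foldl_insert_enum_get? ol (fun i => PySem.Set.ofList (PySem.List.slice ol (some (i + 1)) none)) c]
  cases h : lastIdx ol c with
  | none => rfl
  | some i =>
    have hs : PySem.List.slice ol (some ((i : Int) + 1)) none = ol.drop ((i : Int) + 1).toNat :=
      PySem.List.slice_from ol (by omega)
    have ht : ((i : Int) + 1).toNat = i + 1 := by omega
    simp [hs, ht]

-- the invariant tying A's visited set to B's running maximum rank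
def LoopInv (ol visited : List Char) (maxR : Int) : Prop :=
  (∀ v ∈ visited, ∃ j, lastIdx ol v = some j ∧ (j : Int) ≤ maxR) ∧
  (maxR = -1 ∨ ∃ v ∈ visited, ∃ j, lastIdx ol v = some j ∧ (j : Int) = maxR)

theorem fail_iff {ol visited : List Char} {maxR : Int} (hInv : LoopInv ol visited maxR)
    {l : Char} {i : Nat} (hl : lastIdx ol l = some i) :
    PySem.Set.len (PySem.Set.inter (PySem.Set.ofList (ol.drop (i + 1))) visited) ≠ 0
      ↔ (i : Int) < maxR := by
  have hmem : (∃ v, v ∈ PySem.Set.inter (PySem.Set.ofList (ol.drop (i + 1))) visited)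
      ↔ (i : Int) < maxR := by
    constructor
    · rintro ⟨v, hv⟩
      rw [PySem.Set.mem_inter, PySem.Set.mem_ofList] at hv
      obtain ⟨hvd, hvv⟩ := hv
      obtain ⟨j, hj, hij⟩ := (mem_drop_lastIdx hl v).mp hvd
      obtain ⟨j', hj', hle⟩ := hInv.1 v hvv
      rw [hj] at hj'
      simp at hj'
      omega
    · intro him
      rcases hInv.2 with hneg | ⟨v, hvv, j, hj, hje⟩
      · omega
      · refine ⟨v, ?_⟩
        rw [PySem.Set.mem_inter, PySem.Set.mem_ofList]
        exact ⟨(mem_drop_lastIdx hl v).mpr ⟨j, hj, by omega⟩, hvv⟩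
  rw [← hmem]
  unfold PySem.Set.len
  rcases PySem.Set.inter (PySem.Set.ofList (ol.drop (i + 1))) visited with _ | ⟨a, t⟩
  · simp
  · simp only [List.length_cons]
    constructor
    · intro _; exact ⟨a, List.mem_cons_self⟩
    · intro _ hc; omega

theorem visited_iff {ol visited : List Char} {maxR : Int} (hInv : LoopInv ol visited maxR)
    {l : Char} {i : Nat} (hl : lastIdx ol l = some i) (hno : ¬ (i : Int) < maxR) :
    PySem.Set.contains visited l = false ↔ maxR < (i : Int) := by
  constructor
  · intro hc
    rcases hInv.2 with hneg | ⟨v, hvv, j, hj, hje⟩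
    · omega
    · rcases lt_or_eq_of_le (not_lt.mp hno) with hlt | heq
      · exact hlt
      · exfalso
        have hji : j = i := by omega
        subst hji
        have : v = l := lastIdx_inj hj hl
        subst this
        rw [← Bool.not_eq_true, PySem.Set.contains_iff] at hc
        exact hc hvv
  · intro hlt
    rw [← Bool.not_eq_true, PySem.Set.contains_iff]
    intro hvv
    obtain ⟨j, hj, hle⟩ := hInv.1 l hvv
    rw [hl] at hj
    simp at hj
    omega

theorem loops_agree (ol : List Char) (ts : List Char) :
    ∀ (visited res : List Char) (maxR : Int), LoopInv ol visited maxR →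
    check_text_ordering_loopA (PySem.Set.ofList ol) (check_text_ordering_after ol) ts visited res
      = check_text_ordering_loopB (check_text_ordering_rank ol) ts maxR res := by
  induction ts with
  | nil => intro visited res maxR _; rfl
  | cons l rest ih =>
    intro visited res maxR hInv
    by_cases hmem : l ∈ ol
    · obtain ⟨i, hi⟩ := lastIdx_some_of_mem hmem
      have hlet : PySem.Set.contains (PySem.Set.ofList ol) l = true := by
        rw [PySem.Set.contains_iff, PySem.Set.mem_ofList]; exact hmem
      have hrk : (check_text_ordering_rank ol).get? l = some (i : Int) := by
        rw [rank_get?, hi]; rfl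
      rw [check_text_ordering_loopA, check_text_ordering_loopB, hrk]
      simp only [hlet, Bool.true_eq_false, if_false]
      rw [after_getD, hi]
      by_cases hfail : (i : Int) < maxR
      · rw [if_pos ((fail_iff hInv hi).mpr hfail), if_pos hfail]
      · rw [if_neg (by rw [fail_iff hInv hi]; exact hfail), if_neg hfail]
        by_cases hvis : PySem.Set.contains visited l = false
        · have hgt : maxR < (i : Int) := (visited_iff hInv hi hfail).mp hvis
          rw [if_pos hvis, if_pos hgt]
          have hnotmem : l ∉ visited := by
            rw [← Bool.not_eq_true, PySem.Set.contains_iff] at hvis; exact hvis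
          rw [PySem.Set.add_of_not_mem hnotmem]
          apply ih
          constructor
          · intro v hv
            rcases List.mem_append.mp hv with hv | hv
            · obtain ⟨j, hj, hle⟩ := hInv.1 v hv
              exact ⟨j, hj, by omega⟩
            · simp at hv; subst hv; exact ⟨i, hi, le_refl _⟩
          · exact Or.inr ⟨l, by simp, i, hi, rfl⟩
        · have hge : ¬ maxR < (i : Int) := by
            rw [← visited_iff hInv hi hfail]; exact hvis
          rw [if_neg hvis, if_neg hge]
          exact ih visited res maxR hInv
    · have hlet : PySem.Set.contains (PySem.Set.ofList ol) l = false := by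
        rw [← Bool.not_eq_true, PySem.Set.contains_iff, PySem.Set.mem_ofList]; exact hmem
      have hrk : (check_text_ordering_rank ol).get? l = none := by
        rw [rank_get?, (lastIdx_eq_none_iff ol l).mpr hmem]; rfl
      rw [check_text_ordering_loopA, check_text_ordering_loopB, hrk, if_pos hlet]
      exact ih visited res maxR hInv

-- ===== VERDICT (by name: the statement is the Claim_ definition above) =====
theorem check_text_ordering_spec : Claim_equal_check_text_ordering := by
  intro text ordering_string _
  unfold Spec_check_text_ordering check_text_ordering check_text_ordering_alt
  exact loops_agree ordering_string.toList text.toList [] [] (-1)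
    ⟨by simp, Or.inl rfl⟩
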